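-- pv_equiv track=rewrite | github.com/colinsongf/dialogs | src/dialog/parsing/preprocessing.py | subsentence_comma
-- ===== SOURCE A (Python) =====
-- def subsentence_comma(sentence):
--     """
--     This function delete ',' or changed on ';'
--     Input=sentence                              Output=sentence
--     """
--
--     #init
--     i=0
--     while i < len(sentence):
--         if sentence[i]==',':
--             sentence[i]=';'
--
--             #We delete it if it is at the end of the sentence
--             if i==len(sentence)-1:
--                 sentence=sentence[:i]
--             elif sentence[i+1]=='?' or sentence[i+1]=='!' or sentence[i+1]=='.':
--                 sentence=sentence[:i]+sentence[i+1:]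
--         i=i+1
--     return sentence
-- ===== SOURCE B (Python) =====
-- def subsentence_comma(sentence):
--     """Single forward pass: copy tokens, turning each ',' into ';' except when it is
--     the last token or immediately precedes '?', '!' or '.', in which case it is dropped."""
--     out = []
--     n = len(sentence)
--     for i, tok in enumerate(sentence):
--         if tok == ',':
--             if i == n - 1 or sentence[i + 1] in ('?', '!', '.'):
--                 continue
--             out.append(';')
--         else:
--             out.append(tok)
--     return out
-- ===== Notes on version B (the rewrite author's own statement) =====
-- stated objective: simpler
-- what changed: Replaced the index-mutating while loop that rebuilds the list by slicing at every deleted comma with a single forward pass that builds the output list, dropping a ',' when it is last or precedes '?'/'!'/'.', else emitting ';'.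
import Mathlib
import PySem

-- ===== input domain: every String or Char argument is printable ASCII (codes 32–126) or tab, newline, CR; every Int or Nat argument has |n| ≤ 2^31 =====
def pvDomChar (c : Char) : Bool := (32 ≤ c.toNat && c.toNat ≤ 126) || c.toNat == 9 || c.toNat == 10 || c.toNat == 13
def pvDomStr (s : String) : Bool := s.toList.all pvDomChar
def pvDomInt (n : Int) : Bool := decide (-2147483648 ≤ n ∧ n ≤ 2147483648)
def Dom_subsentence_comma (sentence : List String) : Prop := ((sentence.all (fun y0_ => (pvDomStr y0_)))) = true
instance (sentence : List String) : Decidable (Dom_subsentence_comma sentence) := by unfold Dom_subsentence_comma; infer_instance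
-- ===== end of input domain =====

-- B replaces A's index-mutating, slice-rebuilding while loop by one forward pass building a
-- new list (A also mutates its argument in place; the equivalence proved is about the return
-- value only).

-- ===== PORT A =====
-- while loop over a mutable index i and a mutable list; slices sentence[:i] / sentence[:i]+sentence[i+1:]
-- are exact for these in-range nonnegative indices as List.take / List.take ++ List.drop.
def subsentenceCommaLoopA (sentence : List String) (i : Nat) : List String :=
  if h : i < sentence.length then
    if sentence[i]! = "," then
      -- sentence[i] = ';' (the mutation), inlined at each use
      if i = (sentence.set i ";").length - 1 then
        subsentenceCommaLoopA ((sentence.set i ";").take i) (i + 1)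
      else if (sentence.set i ";")[i+1]! = "?" ∨ (sentence.set i ";")[i+1]! = "!" ∨ (sentence.set i ";")[i+1]! = "." then
        subsentenceCommaLoopA ((sentence.set i ";").take i ++ (sentence.set i ";").drop (i + 1)) (i + 1)
      else
        subsentenceCommaLoopA (sentence.set i ";") (i + 1)
    else
      subsentenceCommaLoopA sentence (i + 1)
  else sentence
termination_by sentence.length - i
decreasing_by
  · simp only [List.length_take, List.length_set]; omega
  · simp only [List.length_append, List.length_take, List.length_drop, List.length_set]; omega
  · simp only [List.length_set]; omega
  · omega

def subsentence_comma (sentence : List String) : List String :=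
  subsentenceCommaLoopA sentence 0

-- ===== PORT B =====
-- single forward pass: a ',' is dropped when last or followed by '?'/'!'/'.', else becomes ';'.
def subsentenceCommaPassB : List String → List String
  | [] => []
  | tok :: rest =>
    if tok = "," then
      match rest with
      | [] => subsentenceCommaPassB rest
      | next :: _ =>
        if next = "?" ∨ next = "!" ∨ next = "." then subsentenceCommaPassB rest
        else ";" :: subsentenceCommaPassB rest
    else tok :: subsentenceCommaPassB rest

def subsentence_comma_alt (sentence : List String) : List String :=
  subsentenceCommaPassB sentence

-- ===== PRECONDITION & SPEC =====
def Spec_subsentence_comma (sentence : List String) (out : List String) : Prop := out = subsentence_comma_alt sentence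
instance (sentence : List String) (out : List String) : Decidable (Spec_subsentence_comma sentence out) := by unfold Spec_subsentence_comma; infer_instance

-- ===== CLAIM (what is proved, stated in full; the proofs are below) =====
def Claim_equal_subsentence_comma : Prop := ∀ (sentence : List String), Dom_subsentence_comma sentence → Spec_subsentence_comma sentence (subsentence_comma sentence)

-- ===== LEMMAS AND PROOFS =====

theorem pv_take_set (s : List String) (i : Nat) (a : String) : (s.set i a).take i = s.take i := by
  apply List.ext_getElem (by simp)
  intro j h1 h2
  rw [List.getElem_take, List.getElem_take, List.getElem_set_ne (by simp at h1; omega)]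

theorem pv_drop_set (s : List String) (i : Nat) (a : String) :
    (s.set i a).drop (i+1) = s.drop (i+1) := by
  apply List.ext_getElem (by simp)
  intro j h1 h2
  rw [List.getElem_drop, List.getElem_drop, List.getElem_set_ne (by omega)]

theorem pv_take_succ (s : List String) (i : Nat) (h : i < s.length) :
    s.take (i+1) = s.take i ++ [s[i]] := by
  rw [List.take_add_one]
  simp [List.getElem?_eq_getElem h]

-- Invariant of A's loop: from index i on, the first i tokens are kept verbatim and the
-- suffix is processed exactly as B's single pass processes it.
theorem loopA_eq (sentence : List String) (i : Nat) :
    subsentenceCommaLoopA sentence i =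
      sentence.take i ++ subsentenceCommaPassB (sentence.drop i) := by
  induction sentence, i using subsentenceCommaLoopA.induct with
  | case1 s i h hc hlast ih =>
    -- trailing comma: deleted
    rw [subsentenceCommaLoopA, dif_pos h, if_pos hc, if_pos hlast, ih]
    have hc' : s[i] = "," := by rwa [getElem!_pos s i h] at hc
    have hi1 : s.length = i + 1 := by simp at hlast; omega
    have hdrop : s.drop i = [","] := by
      rw [List.drop_eq_getElem_cons h, hc']
      simp [List.drop_eq_nil_of_le (by omega : s.length ≤ i + 1)]
    rw [hdrop, pv_take_set]
    have hnil : List.drop (i+1) (List.take i s) = [] :=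
      List.drop_eq_nil_of_le (Nat.le_trans (List.length_take_le i s) (Nat.le_succ i))
    simp [subsentenceCommaPassB, List.take_take, hnil]
  | case2 s i h hc hlast hpunct ih =>
    -- comma before '?'/'!'/'.': deleted
    rw [subsentenceCommaLoopA, dif_pos h, if_pos hc, if_neg hlast, if_pos hpunct, ih]
    have hc' : s[i] = "," := by rwa [getElem!_pos s i h] at hc
    have hi1 : i + 1 < s.length := by simp only [List.length_set] at hlast; omega
    have hgn : (s.set i ";")[i+1]! = s[i+1] := by
      rw [getElem!_pos _ _ (by simpa using hi1), List.getElem_set_ne (by omega)]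
    rw [hgn] at hpunct
    rw [pv_take_set, pv_drop_set]
    have hti : (s.take i).length = i := by simp; omega
    have hone : i + 1 - i = 1 := by omega
    have hcons : s.drop (i+1) = s[i+1] :: s.drop (i+2) := List.drop_eq_getElem_cons hi1
    have htake : (s.take i ++ s.drop (i+1)).take (i+1) = s.take i ++ [s[i+1]] := by
      rw [List.take_append, hti, hone, List.take_take, Nat.min_eq_right (by omega), hcons]
      rfl
    have hdrop2 : (s.take i ++ s.drop (i+1)).drop (i+1) = s.drop (i+2) := by
      rw [List.drop_append, hti, hone]
      have e1 : List.drop (i+1) (List.take i s) = [] :=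
        List.drop_eq_nil_of_le (Nat.le_trans (List.length_take_le i s) (Nat.le_succ i))
      rw [e1, List.nil_append, hcons]
      rfl
    rw [htake, hdrop2]
    have hsdrop : s.drop i = "," :: s[i+1] :: s.drop (i+2) := by
      rw [List.drop_eq_getElem_cons h, hc', List.drop_eq_getElem_cons hi1]
    rw [hsdrop]
    have hnc : ¬ (s[i+1] = ",") := by
      rcases hpunct with h1 | h1 | h1 <;> simp [h1]
    simp [subsentenceCommaPassB, hpunct, hnc]
  | case3 s i h hc hlast hpunct ih =>
    -- plain comma: becomes ';'
    rw [subsentenceCommaLoopA, dif_pos h, if_pos hc, if_neg hlast, if_neg hpunct, ih]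
    have hc' : s[i] = "," := by rwa [getElem!_pos s i h] at hc
    have hi1 : i + 1 < s.length := by simp only [List.length_set] at hlast; omega
    have hgn : (s.set i ";")[i+1]! = s[i+1] := by
      rw [getElem!_pos _ _ (by simpa using hi1), List.getElem_set_ne (by omega)]
    rw [hgn] at hpunct
    have htake : (s.set i ";").take (i+1) = s.take i ++ [";"] := by
      rw [pv_take_succ _ _ (by simpa using h), pv_take_set, List.getElem_set_self (by simpa using h)]
    rw [htake, pv_drop_set]
    have hsdrop : s.drop i = "," :: s[i+1] :: s.drop (i+2) := by
      rw [List.drop_eq_getElem_cons h, hc', List.drop_eq_getElem_cons hi1]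
    rw [hsdrop]
    have hsdrop1 : s.drop (i+1) = s[i+1] :: s.drop (i+2) := List.drop_eq_getElem_cons hi1
    rw [hsdrop1]
    simp only [subsentenceCommaPassB]
    cases hpq : decide (s[i+1] = "?" ∨ s[i+1] = "!" ∨ s[i+1] = ".") with
    | true => exact absurd (of_decide_eq_true hpq) hpunct
    | false =>
      simp [of_decide_eq_false hpq]
  | case4 s i h hc ih =>
    -- token is not a comma: kept
    rw [subsentenceCommaLoopA, dif_pos h, if_neg hc, ih]
    have hc' : ¬ (s[i] = ",") := by rwa [getElem!_pos s i h] at hc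
    rw [List.drop_eq_getElem_cons h]
    simp only [subsentenceCommaPassB, if_neg hc']
    rw [pv_take_succ s i h, List.append_assoc]
    rfl
  | case5 s i h =>
    rw [subsentenceCommaLoopA, dif_neg h]
    rw [List.drop_eq_nil_of_le (Nat.le_of_not_lt h),
      List.take_of_length_le (Nat.le_of_not_lt h)]
    simp [subsentenceCommaPassB]

-- ===== VERDICT (by name: the statement is the Claim_ definition above) =====
theorem subsentence_comma_spec : Claim_equal_subsentence_comma := by
  intro sentence _
  unfold Spec_subsentence_comma subsentence_comma subsentence_comma_alt
  simpa using loopA_eq sentence 0
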